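-- pv_equiv track=rewrite | github.com/LeonHeTheFirst/IR | hw3/queries.py | get_docs
-- ===== SOURCE A (Python) =====
-- def get_docs(lexicon, inv_file, words):
-- 	docs = []
-- 	for word in words:
-- 		word_docs = get_postings_list(lexicon, inv_file, word)
-- 		for doc in word_docs:
-- 			if doc not in docs:
-- 				docs.append(doc)
-- 	docs.sort()
-- 	return docs
--
-- def get_postings_list(lexicon, inv_file, word):
-- 	if word.lower() in lexicon:
-- 		retval = []
-- 		# iterate through the values two at a time
-- 		it = zip(*[iter(inv_file[lexicon[word][2]:lexicon[word][2]
-- 			 + 2*lexicon[word][0]])]*2)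
-- 		for doc, count in it:
-- 			retval.append(doc)
-- 		return retval
-- 	else:
-- 		return []
-- ===== SOURCE B (Python) =====
-- def get_docs(lexicon, inv_file, words):
--     docs = []
--     for word in words:
--         docs += _postings(lexicon, inv_file, word)
--     docs.sort()
--     result = []
--     prev = None
--     for d in docs:
--         if d != prev:
--             result.append(d)
--             prev = d
--     return result
--
--
-- def _postings(lexicon, inv_file, word):
--     if word.lower() not in lexicon:
--         return []
--     entry = lexicon[word]
--     seg = inv_file[entry[2]:entry[2] + 2 * entry[0]]
--     out = []
--     i = 0
--     while i + 1 < len(seg):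
--         out.append(seg[i])
--         i += 2
--     return out
-- ===== Notes on version B (the rewrite author's own statement) =====
-- stated objective: faster
-- what changed: A dedups with an O(n) 'doc not in docs' membership scan on every posting before a final sort; B concatenates all postings unconditionally, sorts once, and removes duplicates in a single linear pass comparing each element with the previously kept one.
import Mathlib
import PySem

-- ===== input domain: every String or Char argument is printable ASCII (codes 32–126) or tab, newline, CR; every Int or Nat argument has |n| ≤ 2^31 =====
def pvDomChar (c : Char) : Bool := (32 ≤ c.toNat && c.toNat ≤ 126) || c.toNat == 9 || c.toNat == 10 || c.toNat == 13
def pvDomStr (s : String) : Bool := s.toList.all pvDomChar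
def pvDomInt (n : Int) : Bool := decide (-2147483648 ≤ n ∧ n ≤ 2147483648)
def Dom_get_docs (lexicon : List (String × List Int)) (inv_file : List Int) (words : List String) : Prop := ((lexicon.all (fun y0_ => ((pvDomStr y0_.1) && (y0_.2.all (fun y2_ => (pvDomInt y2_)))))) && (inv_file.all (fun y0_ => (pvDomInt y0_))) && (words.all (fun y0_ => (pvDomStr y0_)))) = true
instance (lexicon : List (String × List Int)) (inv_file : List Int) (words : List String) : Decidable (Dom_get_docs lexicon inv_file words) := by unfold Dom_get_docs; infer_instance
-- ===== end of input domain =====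

-- B changes the algorithm: A dedups each posting with a linear membership scan before sorting;
-- B concatenates everything, sorts once, and drops adjacent duplicates in one pass (measurably faster).

-- ===== PORT A =====
-- zip(*[iter(l)]*2): the consecutive pairs of l, dropping an unpaired last element
def pvPairs : List Int → List (Int × Int)
  | a :: b :: t => (a, b) :: pvPairs t
  | _ => []

-- get_postings_list from Source A; where Python raises (lexicon[word] missing / entry shorter
-- than 3) the lookups use .getD defaults — those inputs are excluded by Pre_get_docs
def get_postings_list (lexicon : List (String × List Int)) (inv_file : List Int) (word : String) : List Int :=
  if ((PySem.Dict.mk lexicon).get? (PySem.Str.lower word)).isSome then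
    let entry := ((PySem.Dict.mk lexicon).get? word).getD []
    let n := (PySem.List.pyGet? entry 0).getD 0
    let off := (PySem.List.pyGet? entry 2).getD 0
    let seg := PySem.List.slice inv_file (some off) (some (off + 2 * n))
    (pvPairs seg).foldl (fun retval p => retval ++ [p.1]) []
  else []

def get_docs (lexicon : List (String × List Int)) (inv_file : List Int) (words : List String) : List Int :=
  let docs := words.foldl (fun docs word =>
    (get_postings_list lexicon inv_file word).foldl
      (fun docs doc => if doc ∈ docs then docs else docs ++ [doc]) docs) []
  PySem.List.sorted docs (fun x => x) false

-- ===== PORT B =====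
-- the while loop of _postings: every other element while a pair remains
def pvEveryOther : List Int → List Int
  | a :: _ :: t => a :: pvEveryOther t
  | _ => []

-- _postings from Source B (same raise-avoiding .getD defaults outside Pre_ as A's port)
def pvPostingsAlt (lexicon : List (String × List Int)) (inv_file : List Int) (word : String) : List Int :=
  if ((PySem.Dict.mk lexicon).get? (PySem.Str.lower word)).isNone then []
  else
    let entry := ((PySem.Dict.mk lexicon).get? word).getD []
    let seg := PySem.List.slice inv_file (some ((PySem.List.pyGet? entry 2).getD 0))
      (some ((PySem.List.pyGet? entry 2).getD 0 + 2 * (PySem.List.pyGet? entry 0).getD 0))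
    pvEveryOther seg

-- one step of B's dedup pass: state (result, prev)
def pvDedupStep (st : List Int × Option Int) (d : Int) : List Int × Option Int :=
  if some d ≠ st.2 then (st.1 ++ [d], some d) else st

def get_docs_alt (lexicon : List (String × List Int)) (inv_file : List Int) (words : List String) : List Int :=
  let docs := words.foldl (fun docs word => docs ++ pvPostingsAlt lexicon inv_file word) []
  let s := PySem.List.sorted docs (fun x => x) false
  (s.foldl pvDedupStep ([], none)).1

-- ===== PRECONDITION & SPEC =====
-- Pre_ excludes exactly the inputs where A raises: a word whose lower-cased form is a lexicon
-- key but which is itself no key (KeyError) or whose entry has fewer than 3 fields (IndexError).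
def Pre_get_docs (lexicon : List (String × List Int)) (inv_file : List Int) (words : List String) : Prop :=
  ∀ w ∈ words, ((PySem.Dict.mk lexicon).get? (PySem.Str.lower w)).isSome = true →
    3 ≤ (((PySem.Dict.mk lexicon).get? w).getD []).length

instance (lexicon : List (String × List Int)) (inv_file : List Int) (words : List String) : Decidable (Pre_get_docs lexicon inv_file words) := by
  unfold Pre_get_docs; infer_instance

def pvWitness_get_docs : (List (String × List Int)) × List Int × List String :=
  ([("a", [1, 0, 0])], [5, 1, 7, 2], ["a", "b"])

def Spec_get_docs (lexicon : List (String × List Int)) (inv_file : List Int) (words : List String) (out : List Int) : Prop := out = get_docs_alt lexicon inv_file words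
instance (lexicon : List (String × List Int)) (inv_file : List Int) (words : List String) (out : List Int) : Decidable (Spec_get_docs lexicon inv_file words out) := by unfold Spec_get_docs; infer_instance

-- ===== CLAIM (what is proved, stated in full; the proofs are below) =====
def Claim_equal_get_docs : Prop := ∀ (lexicon : List (String × List Int)) (inv_file : List Int) (words : List String), Dom_get_docs lexicon inv_file words → Pre_get_docs lexicon inv_file words → Spec_get_docs lexicon inv_file words (get_docs lexicon inv_file words)

-- ===== LEMMAS AND PROOFS =====

-- the two postings extractions agree
theorem pvPairs_map_fst : ∀ l : List Int, (pvPairs l).map Prod.fst = pvEveryOther l := by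
  intro l
  induction l using pvPairs.induct with
  | case1 a b t ih => simp [pvPairs, pvEveryOther, ih]
  | case2 l h => cases l with
    | nil => rfl
    | cons a t => cases t with
      | nil => rfl
      | cons b t => exact absurd rfl (h a b t)

theorem pvPostings_eq (lexicon : List (String × List Int)) (inv_file : List Int) (word : String) :
    get_postings_list lexicon inv_file word = pvPostingsAlt lexicon inv_file word := by
  unfold get_postings_list pvPostingsAlt
  cases h : (PySem.Dict.mk lexicon).get? (PySem.Str.lower word) with
  | none => simp
  | some v =>
    simp only [Option.isSome_some, Option.isNone_some, if_true, Bool.false_eq_true, if_false]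
    rw [PySem.List.foldl_append_singleton_eq_map]
    simpa using pvPairs_map_fst _

-- folding an inner fold over each g w equals one fold over the flattened list
theorem pvFoldl_flatMap {α β : Type} (f : List β → β → List β) (g : α → List β) :
    ∀ (l : List α) (acc : List β),
      l.foldl (fun d w => (g w).foldl f d) acc = (l.flatMap g).foldl f acc := by
  intro l
  induction l with
  | nil => intro acc; rfl
  | cons w t ih => intro acc; simp [List.foldl_append, ih]

-- A's membership-dedup fold: nodup and membership characterisation
theorem pvDedupMem_char : ∀ (L acc : List Int), acc.Nodup →
    (L.foldl (fun docs doc => if doc ∈ docs then docs else docs ++ [doc]) acc).Nodup ∧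
    ∀ x, x ∈ L.foldl (fun docs doc => if doc ∈ docs then docs else docs ++ [doc]) acc ↔
      x ∈ acc ∨ x ∈ L := by
  intro L
  induction L with
  | nil => intro acc h; simpa using h
  | cons d t ih =>
    intro acc h
    simp only [List.foldl_cons]
    by_cases hd : d ∈ acc
    · rw [if_pos hd]
      refine ⟨(ih acc h).1, fun x => ?_⟩
      rw [(ih acc h).2]
      simp only [List.mem_cons]
      constructor
      · rintro (hx | hx)
        · exact Or.inl hx
        · exact Or.inr (Or.inr hx)
      · rintro (hx | rfl | hx)
        · exact Or.inl hx
        · exact Or.inl hd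
        · exact Or.inr hx
    · rw [if_neg hd]
      have hnd : (acc ++ [d]).Nodup := by
        rw [List.nodup_append]
        refine ⟨h, List.nodup_singleton d, ?_⟩
        intro a ha b hb
        simp only [List.mem_singleton] at hb
        subst hb
        intro hab
        exact hd (hab ▸ ha)
      refine ⟨(ih _ hnd).1, fun x => ?_⟩
      rw [(ih _ hnd).2]
      simp [or_assoc]

-- B's dedup fold rewritten as a structural recursion
def pvDestutterFrom : Option Int → List Int → List Int
  | _, [] => []
  | p, d :: t => if some d ≠ p then d :: pvDestutterFrom (some d) t else pvDestutterFrom p t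

def pvPrevAfter : Option Int → List Int → Option Int
  | p, [] => p
  | p, d :: t => pvPrevAfter (if some d ≠ p then some d else p) t

theorem pvDedupFold_char : ∀ (l : List Int) (acc : List Int) (p : Option Int),
    l.foldl pvDedupStep (acc, p) = (acc ++ pvDestutterFrom p l, pvPrevAfter p l) := by
  intro l
  induction l with
  | nil => intro acc p; simp [pvDestutterFrom, pvPrevAfter]
  | cons d t ih =>
    intro acc p
    simp only [List.foldl_cons, pvDedupStep, pvDestutterFrom, pvPrevAfter]
    by_cases hp : some d ≠ p
    · rw [if_pos hp, if_pos hp, if_pos hp, ih]; simp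
    · rw [if_neg hp, if_neg hp, if_neg hp, ih]

-- on a non-decreasing list, destutter keeps exactly the elements differing from the carried
-- previous value, and the result is strictly increasing
theorem pvDestutter_char : ∀ (l : List Int) (p : Option Int),
    l.Pairwise (· ≤ ·) → (∀ y ∈ l, ∀ q, p = some q → q ≤ y) →
    (∀ x, x ∈ pvDestutterFrom p l ↔ x ∈ l ∧ some x ≠ p) ∧
      (pvDestutterFrom p l).Pairwise (· < ·) := by
  intro l
  induction l with
  | nil => intro p _ _; simp [pvDestutterFrom]
  | cons d t ih =>
    intro p hs hp
    have hd : ∀ y ∈ t, d ≤ y := (List.pairwise_cons.mp hs).1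
    have ht : t.Pairwise (· ≤ ·) := (List.pairwise_cons.mp hs).2
    by_cases hcase : some d ≠ p
    · have ihh := ih (some d) ht (fun y hy q hq => by
        cases hq; exact hd y hy)
      simp only [pvDestutterFrom, if_pos hcase]
      constructor
      · intro x
        simp only [List.mem_cons, (ihh.1 x)]
        constructor
        · rintro (rfl | ⟨hx, hxd⟩)
          · exact ⟨Or.inl rfl, hcase⟩
          · refine ⟨Or.inr hx, fun hxp => ?_⟩
            have h1 : x ≤ d := hp d (by simp) x hxp.symm
            have h2 : d ≤ x := hd x hx
            exact hxd (congrArg some (le_antisymm h1 h2))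
        · rintro ⟨(rfl | hx), hxp⟩
          · exact Or.inl rfl
          · by_cases hxd : x = d
            · exact Or.inl hxd
            · exact Or.inr ⟨hx, by simpa using hxd⟩
      · refine List.pairwise_cons.mpr ⟨fun x hx => ?_, ihh.2⟩
        have := (ihh.1 x).mp hx
        have h1 : d ≤ x := hd x this.1
        have h2 : x ≠ d := by intro h; exact this.2 (by rw [h])
        omega
    · have hpd : p = some d := by
        by_contra hne; exact hcase (fun h => hne h.symm)
      have ihh := ih p ht (fun y hy q hq => hp y (List.mem_cons_of_mem d hy) q hq)
      simp only [pvDestutterFrom, if_neg hcase]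
      refine ⟨fun x => ?_, ihh.2⟩
      rw [ihh.1 x]
      simp only [List.mem_cons]
      constructor
      · rintro ⟨hx, hxp⟩; exact ⟨Or.inr hx, hxp⟩
      · rintro ⟨(rfl | hx), hxp⟩
        · exact absurd hpd.symm hxp
        · exact ⟨hx, hxp⟩

-- ===== VERDICT (by name: the statement is the Claim_ definition above) =====
theorem get_docs_spec : Claim_equal_get_docs := by
  intro lexicon inv_file words _ _
  unfold Spec_get_docs get_docs get_docs_alt
  simp only
  rw [pvFoldl_flatMap]
  have hpost : (words.flatMap (get_postings_list lexicon inv_file)) =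
      words.flatMap (pvPostingsAlt lexicon inv_file) := by
    simp only [List.flatMap]
    exact congrArg List.flatten (List.map_congr_left (fun w _ => pvPostings_eq lexicon inv_file w))
  rw [hpost]
  rw [PySem.List.foldl_append_eq_flatMap]
  set L := words.flatMap (pvPostingsAlt lexicon inv_file) with hL
  simp only [List.nil_append]
  -- characterise both sides
  have hdd := pvDedupMem_char L [] List.nodup_nil
  set dd := L.foldl (fun docs doc => if doc ∈ docs then docs else docs ++ [doc]) [] with hdddef
  have hddmem : ∀ x, x ∈ dd ↔ x ∈ L := by
    intro x; rw [hdd.2 x]; simp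
  set S := PySem.List.sorted L (fun x => x) false with hS
  have hSpw : S.Pairwise (· ≤ ·) := by
    have := PySem.List.sorted_pairwise (xs := L) (key := fun x => x)
    simpa using this
  rw [pvDedupFold_char]
  simp only [List.nil_append]
  have hres := pvDestutter_char S none hSpw (by simp)
  set res := pvDestutterFrom none S with hresdef
  have hresmem : ∀ x, x ∈ res ↔ x ∈ L := by
    intro x
    rw [hres.1 x]
    simp only [hS, PySem.List.mem_sorted]
    simp
  -- res is a strictly increasing rearrangement of dd, hence equals sorted dd
  have hperm : res.Perm dd := by
    rw [List.perm_ext_iff_of_nodup hres.2.nodup hdd.1]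
    intro a; rw [hresmem a, hddmem a]
  have := PySem.List.sorted_eq_of_perm_of_pairwise_lt (xs := dd) (key := fun x => x)
    (ys := res) hperm (by simpa using hres.2)
  exact this
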